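-- pv_equiv track=rewrite | github.com/p3bble123/two-leetcode-per-day | SWExpertAcademy/1209-Sum/1209-Sum.py | getMaxColumnSum
-- ===== SOURCE A (Python) =====
-- def getMaxColumnSum(test):
--     maxColumnSum = 0
--     for col in range(len(test[0])):
--         columnSum = 0
--         for row in range(len(test)):
--             columnSum += test[row][col]
--
--         maxColumnSum = max(maxColumnSum, columnSum)
--
--     return maxColumnSum
-- ===== SOURCE B (Python) =====
-- def getMaxColumnSum(test):
--     width = len(test[0])
--     sums = [0] * width
--     for row in test:
--         for j in range(width):
--             sums[j] += row[j]
--     return max([0] + sums)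
-- ===== Notes on version B (the rewrite author's own statement) =====
-- stated objective: alternative
-- what changed: Instead of A's column-major nested loops that rescan the whole matrix once per column, B makes a single row-major pass maintaining a running vector of per-column partial sums, then takes one max over that vector (floored at 0).
import Mathlib
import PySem

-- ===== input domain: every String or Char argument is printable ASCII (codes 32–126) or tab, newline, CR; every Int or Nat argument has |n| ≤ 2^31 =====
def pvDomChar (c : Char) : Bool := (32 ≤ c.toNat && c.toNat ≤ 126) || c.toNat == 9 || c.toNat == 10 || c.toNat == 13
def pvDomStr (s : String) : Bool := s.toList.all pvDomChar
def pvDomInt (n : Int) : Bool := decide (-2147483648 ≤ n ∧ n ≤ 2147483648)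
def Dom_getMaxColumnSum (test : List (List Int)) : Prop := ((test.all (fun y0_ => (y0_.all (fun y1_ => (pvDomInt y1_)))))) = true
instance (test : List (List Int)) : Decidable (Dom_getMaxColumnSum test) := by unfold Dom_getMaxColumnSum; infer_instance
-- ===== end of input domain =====

-- B replaces A's column-major rescans with a single row-major pass keeping a running vector of column sums (alternative decomposition; same asymptotic cost).

-- ===== PORT A =====
def getMaxColumnSum (test : List (List Int)) : Int :=
  (PySem.List.pyRange 0 ((PySem.List.pyGetD test 0 []).length : Int) 1).foldl
    (fun maxColumnSum col =>
      let columnSum := (PySem.List.pyRange 0 (test.length : Int) 1).foldl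
        (fun s row => s + PySem.List.pyGetD (PySem.List.pyGetD test row []) col 0) 0
      max maxColumnSum columnSum) 0

-- ===== PORT B =====
-- width = len(test[0]); sums = [0]*width; for row in test: for j in range(width): sums[j] += row[j]; return max([0]+sums)
def getMaxColumnSum_alt (test : List (List Int)) : Int :=
  let width := (PySem.List.pyGetD test 0 []).length
  let sums := test.foldl
    (fun sums row =>
      (PySem.List.pyRange 0 (width : Int) 1).foldl
        (fun s j => PySem.List.pySetD s j (PySem.List.pyGetD s j 0 + PySem.List.pyGetD row j 0)) sums)
    (List.replicate width 0)
  (0 :: sums).foldl max 0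

-- ===== PRECONDITION & SPEC =====
-- Pre_ excludes exactly the inputs where the Python A raises IndexError: the empty matrix (test[0])
-- and ragged matrices where some row is shorter than the first row (test[row][col]).
def Pre_getMaxColumnSum (test : List (List Int)) : Prop :=
  test ≠ [] ∧ ∀ r ∈ test, (test.headD []).length ≤ r.length
instance (test : List (List Int)) : Decidable (Pre_getMaxColumnSum test) := by
  unfold Pre_getMaxColumnSum; infer_instance
def pvWitness_getMaxColumnSum : List (List Int) := [[1, -2, 3], [4, 5, -6]]

def Spec_getMaxColumnSum (test : List (List Int)) (out : Int) : Prop := out = getMaxColumnSum_alt test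
instance (test : List (List Int)) (out : Int) : Decidable (Spec_getMaxColumnSum test out) := by unfold Spec_getMaxColumnSum; infer_instance

-- ===== CLAIM (what is proved, stated in full; the proofs are below) =====
def Claim_equal_getMaxColumnSum : Prop := ∀ (test : List (List Int)), Dom_getMaxColumnSum test → Pre_getMaxColumnSum test → Spec_getMaxColumnSum test (getMaxColumnSum test)

-- ===== LEMMAS AND PROOFS =====

-- column sum of column j
def pvColSum (test : List (List Int)) (j : Nat) : Int :=
  (test.map (fun r => r.getD j 0)).sum

-- one row of B's inner loop: pointwise add row onto sums (length preserved, entry j gets +row[j])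
theorem pv_inner (r : List Int) (n : Nat) : ∀ (s : List Int),
    ((List.range n).foldl (fun s k => s.set k (s.getD k 0 + r.getD k 0)) s).length = s.length ∧
    ∀ j, ((List.range n).foldl (fun s k => s.set k (s.getD k 0 + r.getD k 0)) s).getD j 0 =
      if j < n ∧ j < s.length then s.getD j 0 + r.getD j 0 else s.getD j 0 := by
  induction n with
  | zero => intro s; simp
  | succ n ih =>
    intro s
    rw [List.range_succ, List.foldl_append]
    obtain ⟨hlen, hget⟩ := ih s
    set res := (List.range n).foldl (fun s k => s.set k (s.getD k 0 + r.getD k 0)) s with hres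
    simp only [List.foldl_cons, List.foldl_nil]
    constructor
    · simp [hlen]
    · intro j
      have hn : res.getD n 0 = s.getD n 0 := by
        rw [hget n]; simp
      by_cases hj : j = n
      · subst hj
        by_cases hlt : j < s.length
        · have h1 : j < res.length := by omega
          have hset : (res.set j (res.getD j 0 + r.getD j 0)).getD j 0 =
              res.getD j 0 + r.getD j 0 := by
            simp [List.getD, h1]
          rw [hset, hn]
          simp [hlt]
        · have : res.set j (res.getD j 0 + r.getD j 0) = res := by
            apply List.set_eq_of_length_le; omega
          rw [this, hget j]
          simp [hlt]
      · have hset : (res.set n (res.getD n 0 + r.getD n 0)).getD j 0 = res.getD j 0 := by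
          simp [List.getD, List.getElem?_set_ne (Ne.symm hj)]
        rw [hset, hget j]
        have hiff : (j < n + 1) ↔ (j < n) := by omega
        simp [hiff]

-- B's outer loop: folding all rows yields the vector of column sums (offset by the initial sums)
theorem pv_outer (n : Nat) : ∀ (rows : List (List Int)) (s : List Int), s.length = n →
    ((rows.foldl (fun s row =>
        (List.range n).foldl (fun s k => s.set k (s.getD k 0 + row.getD k 0)) s) s).length = n ∧
     ∀ j, j < n →
      (rows.foldl (fun s row =>
        (List.range n).foldl (fun s k => s.set k (s.getD k 0 + row.getD k 0)) s) s).getD j 0 =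
        s.getD j 0 + pvColSum rows j) := by
  intro rows
  induction rows with
  | nil => intro s hs; simp [hs, pvColSum]
  | cons r rs ih =>
    intro s hs
    simp only [List.foldl_cons]
    obtain ⟨hl, hg⟩ := pv_inner r n s
    obtain ⟨hl2, hg2⟩ := ih _ (by rw [hl, hs])
    refine ⟨hl2, fun j hj => ?_⟩
    have hc : pvColSum (r :: rs) j = r.getD j 0 + pvColSum rs j := by
      simp [pvColSum]
    rw [hg2 j hj, hg j, hc, if_pos ⟨hj, by omega⟩]
    ring

-- A's inner loop over rows equals the column sum
theorem inner_sum_eq (test : List (List Int)) (i : Nat) :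
    (List.map (fun k : Nat => (k : Int)) (List.range test.length)).foldl
        (fun s row => s + PySem.List.pyGetD (PySem.List.pyGetD test row []) ((i : Nat) : Int) 0) 0 =
      pvColSum test i := by
  rw [← PySem.List.pyRange_zero_natCast]
  rw [PySem.List.foldl_pyRange_zero_pyGetD' test []
    (fun s r => s + PySem.List.pyGetD r ((i : Nat) : Int) 0) 0]
  rw [pvColSum, List.sum_eq_foldl, List.foldl_map]
  simp

-- A in normal form: max over column sums
theorem A_eq_max (test : List (List Int)) :
    getMaxColumnSum test =
      (List.range (PySem.List.pyGetD test 0 []).length).foldl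
        (fun m k => max m (pvColSum test k)) 0 := by
  unfold getMaxColumnSum
  rw [PySem.List.pyRange_zero_natCast, PySem.List.pyRange_zero_natCast, List.foldl_map]
  apply PySem.List.foldl_congr_mem
  intro acc i hi
  simp only [inner_sum_eq]

-- B in normal form: the accumulated sums vector is the list of column sums
theorem B_eq_max (test : List (List Int)) :
    getMaxColumnSum_alt test =
      (List.range (PySem.List.pyGetD test 0 []).length).foldl
        (fun m k => max m (pvColSum test k)) 0 := by
  set w := (PySem.List.pyGetD test 0 []).length with hw
  have hz : getMaxColumnSum_alt test =
      (0 :: (test.foldl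
        (fun sums row => (PySem.List.pyRange 0 (w : Int) 1).foldl
          (fun s j => PySem.List.pySetD s j (PySem.List.pyGetD s j 0 + PySem.List.pyGetD row j 0)) sums)
        (List.replicate w 0))).foldl max 0 := rfl
  rw [hz, PySem.List.pyRange_zero_natCast]
  have hfold : test.foldl
      (fun sums row => ((List.range w).map (fun k : Nat => (k : Int))).foldl
        (fun s j => PySem.List.pySetD s j (PySem.List.pyGetD s j 0 + PySem.List.pyGetD row j 0)) sums)
      (List.replicate w 0) =
      test.foldl (fun s row => (List.range w).foldl
        (fun s k => s.set k (s.getD k 0 + row.getD k 0)) s) (List.replicate w 0) := by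
    apply PySem.List.foldl_congr_mem
    intro s row _
    rw [List.foldl_map]
    simp
  rw [hfold]
  obtain ⟨hlen, hget⟩ := pv_outer w test (List.replicate w 0) (by simp)
  set sums := test.foldl (fun s row => (List.range w).foldl
      (fun s k => s.set k (s.getD k 0 + row.getD k 0)) s) (List.replicate w 0) with hsums
  have hsums_eq : sums = (List.range w).map (fun j => pvColSum test j) := by
    apply List.ext_getElem
    · simp [hlen]
    · intro i h1 h2
      have hi : i < w := by simpa [hlen] using h1
      have hv := hget i hi
      simp only [List.getD, List.getElem?_eq_getElem h1, Option.getD_some] at hv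
      rw [hv]
      simp [hi]
  rw [hsums_eq]
  simp only [List.foldl_cons, List.foldl_map]
  norm_num

-- ===== VERDICT (by name: the statement is the Claim_ definition above) =====
theorem getMaxColumnSum_spec : Claim_equal_getMaxColumnSum := by
  intro test _ _
  unfold Spec_getMaxColumnSum
  rw [A_eq_max, B_eq_max]
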